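-- pv_equiv track=rewrite | github.com/chuajunyu/adventofcode | 2023/day11/day11.py | expand_universe_sparse
-- ===== SOURCE A (Python) =====
-- def map_galaxy_coordinates(input):
--     galaxy_map = {}
--     curr = 0
--     for y, line in enumerate(input):
--         for x, char in enumerate(line):
--             if char == '#':
--                 galaxy_map[curr] = (y, x)
--                 curr += 1
--             else:
--                 continue
--     return galaxy_map
--
-- def expand_universe_sparse(input, scale):
--     galaxy_map = map_galaxy_coordinates(input)
--
--     # Find all the rows and columns to be expanded
--     rows = []
--     for i, line in enumerate(input):
--         if all([(char == '.') for char in line]):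
--             rows.append(i)
--
--     cols = []
--     for j in range(len(input[0])):
--         if all([line[j] == '.' for line in input]):
--             cols.append(j)
--
--     for galaxy in galaxy_map:
--         y, x = galaxy_map[galaxy]
--
--         to_add_y = 0
--         for row in rows:
--             if row < y:
--                 to_add_y += scale - 1
--
--         to_add_x = 0
--         for col in cols:
--             if col < x:
--                 to_add_x += scale - 1
--         galaxy_map[galaxy] = (y + to_add_y, x + to_add_x)
--
--     return galaxy_map
-- ===== SOURCE B (Python) =====
-- def _count_below(sorted_xs, v):
--     """Number of elements of the ascending list sorted_xs that are < v (bisect_left)."""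
--     lo, hi = 0, len(sorted_xs)
--     while lo < hi:
--         mid = (lo + hi) // 2
--         if sorted_xs[mid] < v:
--             lo = mid + 1
--         else:
--             hi = mid
--     return lo
--
--
-- def expand_universe_sparse(input, scale):
--     grow = scale - 1
--     empty_rows = [y for y, line in enumerate(input) if all(ch == '.' for ch in line)]
--     empty_cols = [x for x in range(len(input[0]))
--                   if all(line[x] == '.' for line in input)]
--     galaxies = {}
--     count = 0
--     for y, line in enumerate(input):
--         for x, ch in enumerate(line):
--             if ch == '#':
--                 galaxies[count] = (y + grow * _count_below(empty_rows, y),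
--                                    x + grow * _count_below(empty_cols, x))
--                 count += 1
--     return galaxies
-- ===== Notes on version B (the rewrite author's own statement) =====
-- stated objective: alternative
-- what changed: Replaces A's per-galaxy linear scans over the empty-row/empty-column lists (and its build-then-rewrite dict pass) with a single pass that shifts each galaxy via binary search (hand-written bisect_left) on the sorted empty-row/empty-column lists; Pre_ excludes only inputs where A raises IndexError (empty input, or a line shorter than the first).
import Mathlib
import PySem

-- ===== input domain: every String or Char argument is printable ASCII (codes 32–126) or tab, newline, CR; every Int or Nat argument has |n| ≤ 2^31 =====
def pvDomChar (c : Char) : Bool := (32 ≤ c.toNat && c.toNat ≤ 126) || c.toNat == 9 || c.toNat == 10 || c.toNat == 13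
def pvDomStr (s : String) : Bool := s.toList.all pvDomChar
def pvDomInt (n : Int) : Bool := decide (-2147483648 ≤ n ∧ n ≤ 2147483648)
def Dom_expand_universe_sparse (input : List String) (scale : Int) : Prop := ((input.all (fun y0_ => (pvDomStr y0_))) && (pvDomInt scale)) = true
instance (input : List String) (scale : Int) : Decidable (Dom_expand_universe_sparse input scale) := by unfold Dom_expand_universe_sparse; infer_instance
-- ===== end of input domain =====

-- B shifts each galaxy by binary search on the sorted empty-row/empty-column lists
-- instead of A's per-galaxy linear scans and dict rewrite pass.

-- ===== PORT A =====
def map_galaxy_coordinates (input : List String) : PySem.Dict Int (Int × Int) :=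
  ((PySem.List.enumerate input 0).foldl
    (fun (st : PySem.Dict Int (Int × Int) × Int) yl =>
      (PySem.List.enumerate yl.2.toList 0).foldl
        (fun st xc =>
          if xc.2 == '#' then (st.1.insert st.2 (yl.1, xc.1), st.2 + 1) else st)
        st)
    (PySem.Dict.empty, 0)).1

def expand_universe_sparse (input : List String) (scale : Int) : List (Int × Int × Int) :=
  let galaxy_map := map_galaxy_coordinates input
  let rows : List Int := (PySem.List.enumerate input 0).foldl
    (fun acc p => if p.2.toList.all (fun c => c == '.') then acc ++ [p.1] else acc) []
  -- input[0] raises IndexError on []; line[j] raises on a line shorter than input[0]: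
  -- both are excluded by Pre_, the defaults below are never reached inside Pre_
  let w := PySem.List.len ((PySem.List.pyGet? input 0).getD "").toList
  let cols : List Int := (PySem.List.pyRange 0 w 1).foldl
    (fun acc j =>
      if input.all (fun line => (PySem.List.pyGet? line.toList j).getD '?' == '.')
      then acc ++ [j] else acc) []
  (galaxy_map.keys.foldl
    (fun (d : PySem.Dict Int (Int × Int)) k =>
      let yx := d.getD k (0, 0)
      let to_add_y := rows.foldl (fun a r => if r < yx.1 then a + (scale - 1) else a) 0
      let to_add_x := cols.foldl (fun a c => if c < yx.2 then a + (scale - 1) else a) 0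
      d.insert k (yx.1 + to_add_y, yx.2 + to_add_x))
    galaxy_map).items

-- ===== PORT B =====
-- _count_below's while-loop, as recursion on the shrinking interval [lo, hi)
def pvCountBelowGo (xs : List Int) (v : Int) (lo hi : Int) : Int :=
  if h : lo < hi then
    let mid := PySem.Int.floordiv (lo + hi) 2
    -- sorted_xs[mid]: in Python always in range here (0 ≤ lo ≤ mid < hi ≤ len); .getD 0 is a totality guard only
    if (PySem.List.pyGet? xs mid).getD 0 < v then pvCountBelowGo xs v (mid + 1) hi
    else pvCountBelowGo xs v lo mid
  else lo
termination_by (hi - lo).toNat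
decreasing_by
  · have hm := PySem.Int.floordiv_eq_ediv_of_pos (a := lo + hi) (b := 2) (by omega)
    simp only [hm]; omega
  · have hm := PySem.Int.floordiv_eq_ediv_of_pos (a := lo + hi) (b := 2) (by omega)
    simp only [hm]; omega

def count_below (xs : List Int) (v : Int) : Int :=
  pvCountBelowGo xs v 0 (PySem.List.len xs)

def expand_universe_sparse_alt (input : List String) (scale : Int) : List (Int × Int × Int) :=
  let grow := scale - 1
  let empty_rows : List Int :=
    ((PySem.List.enumerate input 0).filter
      (fun p => p.2.toList.all (fun c => c == '.'))).map (fun p => p.1)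
  let empty_cols : List Int :=
    (PySem.List.pyRange 0 (PySem.List.len ((PySem.List.pyGet? input 0).getD "").toList) 1).filter
      (fun j => input.all (fun line => (PySem.List.pyGet? line.toList j).getD '?' == '.'))
  -- galaxies is a dict with fresh increasing keys 0,1,2,…: as an association list it is
  -- exactly the appended triples below
  ((PySem.List.enumerate input 0).foldl
    (fun (st : List (Int × Int × Int) × Int) yl =>
      (PySem.List.enumerate yl.2.toList 0).foldl
        (fun st xc =>
          if xc.2 == '#' then
            (st.1 ++ [(st.2,
                       yl.1 + grow * count_below empty_rows yl.1,
                       xc.1 + grow * count_below empty_cols xc.1)],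
             st.2 + 1)
          else st)
        st)
    ([], 0)).1

-- ===== PRECONDITION & SPEC =====
-- Pre_ excludes exactly the inputs where A raises IndexError: the empty list (input[0])
-- and inputs with a line shorter than the first line (line[j] in the column loop).
def Pre_expand_universe_sparse (input : List String) (scale : Int) : Prop :=
  input ≠ [] ∧ ∀ line ∈ input, ((PySem.List.pyGet? input 0).getD "").toList.length ≤ line.toList.length
instance (input : List String) (scale : Int) : Decidable (Pre_expand_universe_sparse input scale) := by unfold Pre_expand_universe_sparse; infer_instance

def pvWitness_expand_universe_sparse : List String × Int := (["#..", ".#.", "..."], 10)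

def Spec_expand_universe_sparse (input : List String) (scale : Int) (out : List (Int × Int × Int)) : Prop := out = expand_universe_sparse_alt input scale
instance (input : List String) (scale : Int) (out : List (Int × Int × Int)) : Decidable (Spec_expand_universe_sparse input scale out) := by unfold Spec_expand_universe_sparse; infer_instance

-- ===== CLAIM (what is proved, stated in full; the proofs are below) =====
def Claim_equal_expand_universe_sparse : Prop := ∀ (input : List String) (scale : Int), Dom_expand_universe_sparse input scale → Pre_expand_universe_sparse input scale → Spec_expand_universe_sparse input scale (expand_universe_sparse input scale)

-- ===== LEMMAS AND PROOFS =====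

def pvRowGals (y : Int) : List Char → Int → List (Int × Int)
  | [], _ => []
  | c :: cs, s => if c == '#' then (y, s) :: pvRowGals y cs (s+1) else pvRowGals y cs (s+1)

def pvGals : List String → Int → List (Int × Int)
  | [], _ => []
  | l :: ls, r => pvRowGals r l.toList 0 ++ pvGals ls (r+1)

theorem pv_inner_flat {σ : Type} (upd : σ → Int → Int → Int → σ) (y : Int) :
    ∀ (cs : List Char) (s : Int) (u : σ) (k : Int),
    (PySem.List.enumerate cs s).foldl
      (fun st xc => if xc.2 == '#' then (upd st.1 st.2 y xc.1, st.2 + 1) else st) (u, k)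
    = ((PySem.List.enumerate (pvRowGals y cs s) k).foldl
        (fun v p => upd v p.1 p.2.1 p.2.2) u, k + (pvRowGals y cs s).length) := by
  intro cs
  induction cs with
  | nil => intro s u k; simp [pvRowGals, PySem.List.enumerate]
  | cons c cs ih =>
    intro s u k
    rw [PySem.List.enumerate_cons]
    simp only [List.foldl_cons, pvRowGals]
    by_cases h : c == '#'
    · simp only [h, ite_true]
      rw [ih (s+1) (upd u k y s) (k+1), PySem.List.enumerate_cons]
      simp only [List.foldl_cons, List.length_cons, Prod.mk.injEq]
      exact ⟨trivial, by push_cast; ring⟩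
    · simp only [h, Bool.false_eq_true, ite_false]
      rw [ih (s+1) u k]

theorem pv_outer_flat {σ : Type} (upd : σ → Int → Int → Int → σ) :
    ∀ (input : List String) (r : Int) (u : σ) (k : Int),
    (PySem.List.enumerate input r).foldl
      (fun st yl => (PySem.List.enumerate yl.2.toList 0).foldl
        (fun st xc => if xc.2 == '#' then (upd st.1 st.2 yl.1 xc.1, st.2 + 1) else st) st) (u, k)
    = ((PySem.List.enumerate (pvGals input r) k).foldl
        (fun v p => upd v p.1 p.2.1 p.2.2) u, k + (pvGals input r).length) := by
  intro input
  induction input with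
  | nil => intro r u k; simp [pvGals, PySem.List.enumerate]
  | cons l ls ih =>
    intro r u k
    rw [PySem.List.enumerate_cons]
    simp only [List.foldl_cons, pvGals]
    rw [pv_inner_flat upd r l.toList 0 u k, ih (r+1), PySem.List.enumerate_append,
        List.foldl_append, List.length_append]
    simp only [Prod.mk.injEq]
    exact ⟨trivial, by push_cast; ring⟩

theorem pv_nodup_fst_enumerate {α : Type} (xs : List α) (s : Int) :
    ((PySem.List.enumerate xs s).map (·.1)).Nodup := by
  rw [List.nodup_iff_pairwise_ne, List.pairwise_map]
  exact (PySem.List.pairwise_lt_enumerate xs s).imp (fun h => ne_of_lt h)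

-- skip-head: rewriting keys different from the head leaves the head entry in place
theorem pv_dict_skip (F : (Int × Int) → (Int × Int)) :
    ∀ (ks : List Int) (p : Int × (Int × Int)) (L : List (Int × (Int × Int))),
    p.1 ∉ ks →
    ks.foldl (fun d k => d.insert k (F (d.getD k (0, 0)))) (PySem.Dict.mk (p :: L))
    = PySem.Dict.mk (p :: (ks.foldl (fun d k => d.insert k (F (d.getD k (0, 0)))) (PySem.Dict.mk L)).items) := by
  intro ks
  induction ks with
  | nil => intro p L h; rfl
  | cons k ks ih =>
    intro p L h
    have hpk : p.1 ≠ k := fun he => h (by simp [he])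
    have hgd : (PySem.Dict.mk (p :: L)).getD k (0, 0) = (PySem.Dict.mk L).getD k (0, 0) := by
      rw [PySem.Dict.getD_eq_get?_getD, PySem.Dict.getD_eq_get?_getD]
      cases p with
      | mk pk pv =>
        rw [PySem.Dict.get?_mk_cons]
        simp only at hpk
        simp [hpk]
    have hins : ∀ v, (PySem.Dict.mk (p :: L)).insert k v
        = PySem.Dict.mk (p :: ((PySem.Dict.mk L).insert k v).items) := by
      intro v
      apply PySem.Dict.ext
      by_cases hc : (PySem.Dict.mk L).contains k
      · rw [PySem.Dict.items_insert_of_contains _ v (by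
          show (PySem.Dict.mk (p :: L)).contains k = true
          rw [PySem.Dict.contains_mk] at hc ⊢
          simp [List.any_cons, hc]),
          PySem.Dict.items_insert_of_contains _ v hc]
        simp only [List.map_cons]
        have : (p.1 == k) = false := by simp [hpk]
        simp [this]
      · have hc' : (PySem.Dict.mk L).contains k = false := by
          rwa [Bool.not_eq_true] at hc
        have hpk' : (p.1 == k) = false := by simp [hpk]
        have hc2 : (PySem.Dict.mk (p :: L)).contains k = false := by
          rw [PySem.Dict.contains_mk] at hc' ⊢
          simp [List.any_cons, hpk', hc']
        rw [PySem.Dict.items_insert_of_not_contains _ v hc2,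
          PySem.Dict.items_insert_of_not_contains _ v hc']
        rfl
    simp only [List.foldl_cons, hgd, hins]
    rw [ih _ _ (fun hx => h (List.mem_cons_of_mem _ hx))]

theorem pv_dict_rewrite (F : (Int × Int) → (Int × Int)) :
    ∀ (L : List (Int × (Int × Int))), (L.map (·.1)).Nodup →
    ((L.map (·.1)).foldl (fun d k => d.insert k (F (d.getD k (0, 0)))) (PySem.Dict.mk L)).items
    = L.map (fun p => (p.1, F p.2)) := by
  intro L
  induction L with
  | nil => intro _; rfl
  | cons p L ih =>
    intro hnd
    simp only [List.map_cons, List.nodup_cons] at hnd ⊢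
    obtain ⟨hp, hnd'⟩ := hnd
    simp only [List.foldl_cons]
    have hgd : (PySem.Dict.mk (p :: L)).getD p.1 (0, 0) = p.2 := by
      rw [PySem.Dict.getD_eq_get?_getD]
      cases p with
      | mk pk pv => rw [PySem.Dict.get?_mk_cons]; simp
    have hc : (PySem.Dict.mk (p :: L)).contains p.1 = true := by
      rw [PySem.Dict.contains_mk]; simp [List.any_cons]
    have hins : (PySem.Dict.mk (p :: L)).insert p.1 (F p.2)
        = PySem.Dict.mk ((p.1, F p.2) :: L) := by
      apply PySem.Dict.ext
      rw [PySem.Dict.items_insert_of_contains _ _ hc]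
      show List.map _ (p :: L) = _
      simp only [List.map_cons, BEq.rfl, ite_true]
      congr 1
      have hmap : List.map (fun q => if (q.1 == p.1) = true then (p.1, F p.2) else q) L
          = List.map id L := by
        apply List.map_congr_left
        intro q hq
        have : (q.1 == p.1) = false := by
          simp only [beq_eq_false_iff_ne, ne_eq]
          intro he; exact hp (he ▸ List.mem_map_of_mem hq)
        simp [this]
      rw [hmap, List.map_id]
    rw [hgd, hins, pv_dict_skip F _ _ _ (by simpa using hp), ih hnd']

-- A's per-galaxy row/col shift, as a function of the coordinates
def pvFA (input : List String) (scale : Int) (yx : Int × Int) : Int × Int :=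
  let rows : List Int := (PySem.List.enumerate input 0).foldl
    (fun acc p => if p.2.toList.all (fun c => c == '.') then acc ++ [p.1] else acc) []
  let w := PySem.List.len ((PySem.List.pyGet? input 0).getD "").toList
  let cols : List Int := (PySem.List.pyRange 0 w 1).foldl
    (fun acc j =>
      if input.all (fun line => (PySem.List.pyGet? line.toList j).getD '?' == '.')
      then acc ++ [j] else acc) []
  (yx.1 + rows.foldl (fun a r => if r < yx.1 then a + (scale - 1) else a) 0,
   yx.2 + cols.foldl (fun a c => if c < yx.2 then a + (scale - 1) else a) 0)

-- B's per-galaxy shift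
def pvFB (input : List String) (scale : Int) (yx : Int × Int) : Int × Int :=
  let empty_rows : List Int :=
    ((PySem.List.enumerate input 0).filter
      (fun p => p.2.toList.all (fun c => c == '.'))).map (fun p => p.1)
  let empty_cols : List Int :=
    (PySem.List.pyRange 0 (PySem.List.len ((PySem.List.pyGet? input 0).getD "").toList) 1).filter
      (fun j => input.all (fun line => (PySem.List.pyGet? line.toList j).getD '?' == '.'))
  (yx.1 + (scale - 1) * count_below empty_rows yx.1,
   yx.2 + (scale - 1) * count_below empty_cols yx.2)

theorem pvA_mapgal (input : List String) :
    map_galaxy_coordinates input = PySem.Dict.mk (PySem.List.enumerate (pvGals input 0) 0) := by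
  have h := pv_outer_flat (fun (d : PySem.Dict Int (Int × Int)) k y x => d.insert k (y, x))
    input 0 PySem.Dict.empty 0
  have h2 : map_galaxy_coordinates input
      = (PySem.List.enumerate (pvGals input 0) 0).foldl
          (fun d p => d.insert p.1 p.2) PySem.Dict.empty :=
    congrArg Prod.fst h
  rw [h2]
  apply PySem.Dict.ext
  have h3 := PySem.Dict.items_foldl_insert_fresh (PySem.List.enumerate (pvGals input 0) 0)
    (fun p => p.1) (fun p => p.2) PySem.Dict.empty
    (fun a _ => by simp [pysem]) (pv_nodup_fst_enumerate _ _)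
  simpa using h3

theorem pvA_shape (input : List String) (scale : Int) :
    expand_universe_sparse input scale
    = (PySem.List.enumerate (pvGals input 0) 0).map
        (fun p => (p.1, pvFA input scale p.2)) := by
  unfold expand_universe_sparse
  rw [pvA_mapgal]
  exact pv_dict_rewrite (pvFA input scale) (PySem.List.enumerate (pvGals input 0) 0)
    (pv_nodup_fst_enumerate _ _)

theorem pvB_shape (input : List String) (scale : Int) :
    expand_universe_sparse_alt input scale
    = (PySem.List.enumerate (pvGals input 0) 0).map
        (fun p => (p.1, pvFB input scale p.2)) := by
  have h1 : expand_universe_sparse_alt input scale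
      = (PySem.List.enumerate (pvGals input 0) 0).foldl
          (fun v p => v ++ [(p.1, pvFB input scale p.2)]) [] :=
    congrArg Prod.fst (pv_outer_flat
      (fun v k y x => v ++ [(k, pvFB input scale (y, x))]) input 0 [] 0)
  rw [h1]
  simpa using PySem.List.foldl_append_singleton_eq_map
    (fun p => ((p.1 : Int), pvFB input scale p.2)) (PySem.List.enumerate (pvGals input 0) 0) []

-- A's linear scan counts the elements below the bound
theorem pv_foldl_ite_add_const {α : Type} (p : α → Prop) [DecidablePred p] (c : Int) :
    ∀ (l : List α) (a : Int),
    l.foldl (fun a r => if p r then a + c else a) a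
    = a + c * ((l.countP fun r => decide (p r)) : Int) := by
  intro l
  induction l with
  | nil => intro a; simp
  | cons x l ih =>
    intro a
    simp only [List.foldl_cons, List.countP_cons]
    by_cases h : p x
    · simp only [h, ite_true, decide_true]
      rw [ih]; push_cast; ring
    · simp only [h, ite_false, decide_false]
      rw [ih]; simp

-- a list whose truth values of p flip once at index k has countP p = k
theorem pv_countP_of_boundary (xs : List Int) (p : Int → Bool) (k : Nat) (hk : k ≤ xs.length)
    (h1 : ∀ i, i < k → p (xs.getD i 0) = true)
    (h2 : ∀ i, k ≤ i → i < xs.length → p (xs.getD i 0) = false) :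
    xs.countP p = k := by
  have hsplit : xs = xs.take k ++ xs.drop k := (List.take_append_drop k xs).symm
  rw [hsplit, List.countP_append]
  have htake : (xs.take k).countP p = (xs.take k).length := by
    rw [List.countP_eq_length]
    intro a ha
    obtain ⟨i, hi, hia⟩ := List.mem_iff_getElem.mp ha
    have hilt : i < k := lt_of_lt_of_le hi (by simp [List.length_take])
    have hix : i < xs.length := by omega
    have : a = xs.getD i 0 := by
      rw [List.getD_eq_getElem xs 0 hix, ← hia, List.getElem_take]
    rw [this]; exact h1 i hilt
  have hdrop : (xs.drop k).countP p = 0 := by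
    rw [List.countP_eq_zero]
    intro a ha
    obtain ⟨i, hi, hia⟩ := List.mem_iff_getElem.mp ha
    have hix : k + i < xs.length := by
      have := List.length_drop (l := xs) (i := k); omega
    have : a = xs.getD (k + i) 0 := by
      rw [List.getD_eq_getElem xs 0 hix, ← hia, List.getElem_drop]
    rw [this, h2 (k + i) (by omega) hix]; simp
  rw [htake, hdrop, List.length_take]
  omega

-- monotone access in a ≤-sorted list
theorem pv_sorted_getD_mono (xs : List Int) (hs : xs.Pairwise (· ≤ ·))
    {i j : Nat} (hij : i ≤ j) (hj : j < xs.length) :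
    xs.getD i 0 ≤ xs.getD j 0 := by
  rcases Nat.eq_or_lt_of_le hij with h | h
  · subst h; exact le_refl _
  · rw [List.getD_eq_getElem xs 0 (by omega), List.getD_eq_getElem xs 0 hj]
    exact List.pairwise_iff_getElem.mp hs i j (by omega) hj h

-- the binary-search loop returns the count of elements < v, given the bracketing invariants
theorem pv_go_spec (xs : List Int) (v : Int) (hs : xs.Pairwise (· ≤ ·)) :
    ∀ (n : Nat) (lo hi : Int), (hi - lo).toNat ≤ n → 0 ≤ lo → lo ≤ hi → hi ≤ xs.length →
    (∀ i : Nat, i < lo.toNat → xs.getD i 0 < v) →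
    (∀ i : Nat, hi.toNat ≤ i → i < xs.length → ¬ xs.getD i 0 < v) →
    pvCountBelowGo xs v lo hi = ((xs.countP fun a => decide (a < v) : Nat) : Int) := by
  intro n
  induction n with
  | zero =>
    intro lo hi hn h0 hlh hhl h1 h2
    have heq : lo = hi := by omega
    rw [pvCountBelowGo]
    simp only [heq, lt_irrefl, dite_false]
    have := pv_countP_of_boundary xs (fun a => decide (a < v)) hi.toNat (by omega)
      (fun i hi' => by simp only [decide_eq_true_eq]; exact h1 i (by omega))
      (fun i hge hlt => by simp only [decide_eq_false_iff_not]; exact h2 i hge hlt)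
    omega
  | succ n ih =>
    intro lo hi hn h0 hlh hhl h1 h2
    rw [pvCountBelowGo]
    by_cases h : lo < hi
    · simp only [h, dite_true]
      have hmid := PySem.Int.floordiv_eq_ediv_of_pos (a := lo + hi) (b := 2) (by omega)
      set mid := PySem.Int.floordiv (lo + hi) 2 with hmdef
      have hb1 : lo ≤ mid := by omega
      have hb2 : mid < hi := by omega
      have hmr : (PySem.List.pyGet? xs mid).getD 0 = xs.getD mid.toNat 0 := by
        rw [PySem.List.pyGet?_of_nonneg xs (by omega), List.getD_eq_getElem?_getD]
      by_cases hcmp : (PySem.List.pyGet? xs mid).getD 0 < v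
      · simp only [hcmp, ite_true]
        apply ih (mid + 1) hi (by omega) (by omega) (by omega) hhl
        · intro i hi'
          by_cases hil : i < lo.toNat
          · exact h1 i hil
          · have hile : i ≤ mid.toNat := by omega
            calc xs.getD i 0 ≤ xs.getD mid.toNat 0 :=
                  pv_sorted_getD_mono xs hs hile (by omega)
              _ < v := by rwa [hmr] at hcmp
        · exact h2
      · simp only [hcmp, ite_false]
        apply ih lo mid (by omega) h0 (by omega) (by omega) h1
        intro i hge hlt hvi
        apply hcmp
        rw [hmr]
        exact lt_of_le_of_lt (pv_sorted_getD_mono xs hs hge hlt) hvi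
    · simp only [h, dite_false]
      have heq : lo = hi := by omega
      have := pv_countP_of_boundary xs (fun a => decide (a < v)) hi.toNat (by omega)
        (fun i hi' => by simp only [decide_eq_true_eq]; exact h1 i (by omega))
        (fun i hge hlt => by simp only [decide_eq_false_iff_not]; exact h2 i hge hlt)
      omega

theorem pv_count_below_sorted (xs : List Int) (v : Int) (hs : xs.Pairwise (· ≤ ·)) :
    count_below xs v = ((xs.countP fun a => decide (a < v) : Nat) : Int) := by
  unfold count_below
  rw [PySem.List.len_eq]
  apply pv_go_spec xs v hs xs.length 0 xs.length (by omega) (by omega) (by omega) (by omega)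
  · intro i hi; omega
  · intro i hge hlt; omega

-- sortedness of the two empty-lists
theorem pv_rows_sorted (input : List String) (P : Int × String → Bool) :
    ((((PySem.List.enumerate input 0).filter P).map (fun p => p.1)).Pairwise (· ≤ ·)) := by
  rw [List.pairwise_map]
  exact ((PySem.List.pairwise_lt_enumerate input 0).sublist
    List.filter_sublist).imp (fun h => le_of_lt h)

theorem pv_cols_sorted (a b : Int) (Q : Int → Bool) :
    (((PySem.List.pyRange a b 1).filter Q).Pairwise (· ≤ ·)) := by
  exact ((PySem.List.pairwise_lt_pyRange_one a b).sublist
    List.filter_sublist).imp (fun h => le_of_lt h)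

theorem pv_F_eq (input : List String) (scale : Int) (yx : Int × Int) :
    pvFA input scale yx = pvFB input scale yx := by
  dsimp only [pvFA, pvFB]
  rw [PySem.List.foldl_append_if (fun (q : Int × String) => q.2.toList.all (fun c => c == '.'))
        (fun q => q.1) (PySem.List.enumerate input 0) [],
      PySem.List.foldl_append_if_eq_filter
        (fun j => input.all (fun line => (PySem.List.pyGet? line.toList j).getD '?' == '.'))
        (PySem.List.pyRange 0 (PySem.List.len ((PySem.List.pyGet? input 0).getD "").toList) 1) []]
  simp only [List.nil_append]
  rw [pv_foldl_ite_add_const (fun r => r < yx.1) (scale - 1),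
      pv_foldl_ite_add_const (fun c => c < yx.2) (scale - 1),
      pv_count_below_sorted _ _ (pv_rows_sorted input _),
      pv_count_below_sorted _ _ (pv_cols_sorted _ _ _)]
  simp

-- ===== VERDICT (by name: the statement is the Claim_ definition above) =====
theorem expand_universe_sparse_spec : Claim_equal_expand_universe_sparse := by
  intro input scale hdom hpre
  unfold Spec_expand_universe_sparse
  rw [pvA_shape, pvB_shape]
  apply List.map_congr_left
  intro p hp
  exact congrArg (fun v => (p.1, v)) (pv_F_eq input scale p.2)
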